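-- pv_equiv track=rewrite | github.com/dharanimurugaraj/inventory-optimization-system | demand_prediction.py | predict_demand
-- ===== SOURCE A (Python) =====
-- def predict_demand(sales_history, window_size=3):
--     # Simple moving average using sliding window
--     if len(sales_history) < window_size:
--         return sum(sales_history) // len(sales_history)
--
--     demand = []
--     for i in range(len(sales_history) - window_size + 1):
--         window = sales_history[i:i+window_size]
--         demand.append(sum(window) // window_size)
--     return demand[-1]  # Predict next demand
-- ===== SOURCE B (Python) =====
-- def predict_demand(sales_history, window_size=3):
--     # Simple moving average: only the final window matters for the prediction
--     if len(sales_history) < window_size: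
--         return sum(sales_history) // len(sales_history)
--     return sum(sales_history[-window_size:]) // window_size
-- ===== Notes on version B (the rewrite author's own statement) =====
-- stated objective: faster
-- what changed: B drops the loop that builds and floor-averages every sliding window only to keep the last element, and directly floor-averages the final window sales_history[-window_size:] (O(n*w) -> O(n)); the short-history fallback is unchanged.
-- outside the precondition, e.g. on predict_demand([1, 2], -1): A returns 0, B returns -2; on predict_demand([1, 2], 0): A raises ZeroDivisionError, B raises ZeroDivisionError; on predict_demand([], 3): A raises ZeroDivisionError, B raises ZeroDivisionError
import Mathlib
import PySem

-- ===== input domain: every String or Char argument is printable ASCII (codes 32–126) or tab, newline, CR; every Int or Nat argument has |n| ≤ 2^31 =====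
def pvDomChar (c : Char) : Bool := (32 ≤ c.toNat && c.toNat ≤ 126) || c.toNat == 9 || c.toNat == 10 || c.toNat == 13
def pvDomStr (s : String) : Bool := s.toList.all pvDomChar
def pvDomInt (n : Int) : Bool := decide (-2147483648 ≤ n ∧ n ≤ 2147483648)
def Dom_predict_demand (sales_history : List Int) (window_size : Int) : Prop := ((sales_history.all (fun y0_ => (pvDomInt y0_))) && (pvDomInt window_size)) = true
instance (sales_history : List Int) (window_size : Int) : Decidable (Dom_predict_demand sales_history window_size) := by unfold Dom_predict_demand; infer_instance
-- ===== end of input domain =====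

-- B replaces A's loop over all sliding windows with a direct floor-average of the final window (simpler; same result).


-- ===== PORT A =====
def predict_demand (sales_history : List Int) (window_size : Int) : Int :=
  if (sales_history.length : Int) < window_size then
    PySem.Int.floordiv sales_history.sum (sales_history.length : Int)
  else
    let demand : List Int :=
      (PySem.List.pyRange 0 ((sales_history.length : Int) - window_size + 1) 1).foldl
        (fun acc i =>
          acc ++ [PySem.Int.floordiv
            (PySem.List.slice sales_history (some i) (some (i + window_size))).sum window_size]) []
    (PySem.List.pyGet? demand (-1)).getD 0

-- ===== PORT B =====
def predict_demand_alt (sales_history : List Int) (window_size : Int) : Int :=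
  if (sales_history.length : Int) < window_size then
    PySem.Int.floordiv sales_history.sum (sales_history.length : Int)
  else
    PySem.Int.floordiv (PySem.List.slice sales_history (some (-window_size)) none).sum window_size

-- ===== PRECONDITION & SPEC =====
-- Pre_ excludes the empty list (A raises ZeroDivisionError) and window_size ≤ 0 (window_size = 0
-- raises ZeroDivisionError; a negative window_size is outside the natural domain of a moving
-- average — A happens to return 0 there by summing empty slices, which B does not mimic).
def Pre_predict_demand (sales_history : List Int) (window_size : Int) : Prop :=
  sales_history ≠ [] ∧ 1 ≤ window_size
instance (sales_history : List Int) (window_size : Int) : Decidable (Pre_predict_demand sales_history window_size) := by unfold Pre_predict_demand; infer_instance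
def pvWitness_predict_demand : List Int × Int := ([5, 1, 2, 9], 3)

def Spec_predict_demand (sales_history : List Int) (window_size : Int) (out : Int) : Prop := out = predict_demand_alt sales_history window_size
instance (sales_history : List Int) (window_size : Int) (out : Int) : Decidable (Spec_predict_demand sales_history window_size out) := by unfold Spec_predict_demand; infer_instance

-- ===== CLAIM (what is proved, stated in full; the proofs are below) =====
def Claim_equal_predict_demand : Prop := ∀ (sales_history : List Int) (window_size : Int), Dom_predict_demand sales_history window_size → Pre_predict_demand sales_history window_size → Spec_predict_demand sales_history window_size (predict_demand sales_history window_size)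

-- ===== LEMMAS AND PROOFS =====
-- The two slice expressions at the last window position are the same sublist.
theorem last_window_eq (sh : List Int) (ws : Int) (h1 : 1 ≤ ws) (h2 : ws ≤ (sh.length : Int)) :
    PySem.List.slice sh (some ((sh.length : Int) - ws)) (some ((sh.length : Int) - ws + ws))
      = PySem.List.slice sh (some (-ws)) none := by
  have hws : ws = ((ws.toNat : Int)) := by omega
  rw [hws, PySem.List.slice_from_neg_natCast sh ws.toNat (by omega)]
  rw [PySem.List.slice_toNat sh (by omega) (by omega)]
  have hdrop : ((sh.length : Int) - ↑ws.toNat).toNat = sh.length - ws.toNat := by omega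
  rw [hdrop]
  have hlen : (sh.drop (sh.length - ws.toNat)).length = ws.toNat := by
    simp; omega
  rw [List.take_of_length_le (by rw [hlen]; omega)]

theorem predict_demand_spec' (sh : List Int) (ws : Int) (hpre : Pre_predict_demand sh ws) :
    predict_demand sh ws = predict_demand_alt sh ws := by
  obtain ⟨hne, hws⟩ := hpre
  unfold predict_demand predict_demand_alt
  by_cases h : (sh.length : Int) < ws
  · simp [h]
  · simp only [h, if_false]
    rw [not_lt] at h
    rw [PySem.List.foldl_append_singleton_eq_map]
    rw [PySem.List.pyRange_one_succ_right (by omega : (0:Int) ≤ (sh.length : Int) - ws)]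
    rw [List.map_append, List.map_cons, List.map_nil, List.nil_append,
      PySem.List.pyGet?_neg_one_append_singleton, Option.getD_some,
      last_window_eq sh ws hws h]

-- ===== VERDICT (by name: the statement is the Claim_ definition above) =====
theorem predict_demand_spec : Claim_equal_predict_demand := by
  intro sh ws _ hpre
  exact predict_demand_spec' sh ws hpre
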